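-- pv_equiv track=rewrite | github.com/adityatripathi676/password-strength-analyzer | backend/features.py | count_sequential_chars
-- ===== SOURCE A (Python) =====
-- def count_sequential_chars(password: str) -> int:
--     """Count runs of sequential characters (abc, 123, etc.)."""
--     count = 0
--     p = password.lower()
--     for i in range(len(p) - 2):
--         a, b, c = ord(p[i]), ord(p[i + 1]), ord(p[i + 2])
--         if a + 1 == b and b + 1 == c:
--             count += 1
--         elif a - 1 == b and b - 1 == c:
--             count += 1  # reverse sequential
--     return count
-- ===== SOURCE B (Python) =====
-- def count_sequential_chars(password: str) -> int:
--     """Count runs of sequential characters (abc, 123, etc.) by grouping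
--     consecutive equal ord-deltas: a group of g equal deltas of value +1 or -1
--     spans g+1 characters and contributes g-1 length-3 windows."""
--     p = password.lower()
--     count = 0
--     run = 0          # length of the current group of equal adjacent deltas
--     prev_d = None    # the delta of that group
--     for x, y in zip(p, p[1:]):
--         d = ord(y) - ord(x)
--         if d == prev_d:
--             run += 1
--         else:
--             if prev_d in (1, -1):
--                 count += run - 1
--             run = 1
--             prev_d = d
--     if prev_d in (1, -1):
--         count += run - 1
--     return count
-- ===== Notes on version B (the rewrite author's own statement) =====
-- stated objective: alternative
-- what changed: Replaces the index-based scan over all length-3 windows by a single pass over adjacent ord-deltas that groups runs of equal +/-1 deltas and adds (group length - 1) per group.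
import Mathlib
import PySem

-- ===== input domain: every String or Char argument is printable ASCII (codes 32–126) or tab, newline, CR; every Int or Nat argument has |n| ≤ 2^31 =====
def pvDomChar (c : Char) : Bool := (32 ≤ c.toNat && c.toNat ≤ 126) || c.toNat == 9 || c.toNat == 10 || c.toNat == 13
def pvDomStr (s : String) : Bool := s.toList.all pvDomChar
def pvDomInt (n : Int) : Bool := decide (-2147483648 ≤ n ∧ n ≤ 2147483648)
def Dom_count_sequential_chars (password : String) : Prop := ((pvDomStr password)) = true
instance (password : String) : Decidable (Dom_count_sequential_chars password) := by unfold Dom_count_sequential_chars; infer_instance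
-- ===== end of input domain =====

-- B replaces A's scan over all 3-windows by one pass grouping runs of equal +/-1 ord-deltas (alternative decomposition, same cost).

-- ===== PORT A =====
def count_sequential_chars (password : String) : Int :=
  let p : List Char := (PySem.Str.lower password).toList
  (PySem.List.pyRange 0 ((p.length : Int) - 2) 1).foldl
    (fun count i =>
      let a : Int := ((PySem.List.pyGetD p i ' ').toNat : Int)
      let b : Int := ((PySem.List.pyGetD p (i + 1) ' ').toNat : Int)
      let c : Int := ((PySem.List.pyGetD p (i + 2) ' ').toNat : Int)
      if a + 1 = b ∧ b + 1 = c then count + 1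
      else if a - 1 = b ∧ b - 1 = c then count + 1
      else count) 0

-- ===== PORT B =====
-- the loop of Source B: prev = last char seen, prevd = delta of the current group, run = its length
def csc_go (prev : Char) (prevd : Option Int) (run : Int) (count : Int) : List Char → Int
  | [] => if prevd = some 1 ∨ prevd = some (-1) then count + (run - 1) else count
  | y :: t =>
      let d : Int := (y.toNat : Int) - (prev.toNat : Int)
      if some d = prevd then csc_go y prevd (run + 1) count t
      else
        let count' := if prevd = some 1 ∨ prevd = some (-1) then count + (run - 1) else count
        csc_go y (some d) 1 count' t

def count_sequential_chars_alt (password : String) : Int :=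
  match (PySem.Str.lower password).toList with
  | [] => 0
  | c :: t => csc_go c none 0 0 t

-- ===== PRECONDITION & SPEC =====
def Spec_count_sequential_chars (password : String) (out : Int) : Prop := out = count_sequential_chars_alt password
instance (password : String) (out : Int) : Decidable (Spec_count_sequential_chars password out) := by unfold Spec_count_sequential_chars; infer_instance

-- ===== CLAIM (what is proved, stated in full; the proofs are below) =====
def Claim_equal_count_sequential_chars : Prop := ∀ (password : String), Dom_count_sequential_chars password → Spec_count_sequential_chars password (count_sequential_chars password)

-- ===== LEMMAS AND PROOFS =====

-- structural count of sequential 3-windows over the ord list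
def cscCnt : List Int → Int
  | a :: b :: c :: t =>
      (if (a + 1 = b ∧ b + 1 = c) ∨ (a - 1 = b ∧ b - 1 = c) then 1 else 0) + cscCnt (b :: c :: t)
  | _ => 0

-- delta-based count: prevd is the last delta (if any), a the last element
def cscG (prevd : Option Int) (a : Int) : List Int → Int
  | [] => 0
  | b :: t => (if prevd = some (b - a) ∧ (b - a = 1 ∨ b - a = -1) then 1 else 0) + cscG (some (b - a)) b t

def cscPend (prevd : Option Int) (run : Int) : Int :=
  if prevd = some 1 ∨ prevd = some (-1) then run - 1 else 0

def cscOrd (c : Char) : Int := (c.toNat : Int)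

lemma csc_go_eq (t : List Char) : ∀ (prev : Char) (prevd : Option Int) (run count : Int),
    csc_go prev prevd run count t = count + cscPend prevd run + cscG prevd (cscOrd prev) (t.map cscOrd) := by
  induction t with
  | nil =>
      intro prev prevd run count
      simp only [csc_go, cscG, List.map_nil, cscPend]
      split_ifs <;> ring
  | cons y t ih =>
      intro prev prevd run count
      rcases prevd with _ | pd
      · simp only [csc_go, List.map_cons, cscG, cscOrd, cscPend, ih]
        simp only [reduceCtorEq, or_self, if_false, false_and]
        split_ifs <;> ring
      · by_cases hd : ((y.toNat : Int) - (prev.toNat : Int)) = pd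
        · subst hd
          simp only [csc_go, List.map_cons, cscG, cscOrd, cscPend, ih, Option.some_inj, true_and]
          split_ifs <;> ring
        · simp only [csc_go, List.map_cons, cscG, cscOrd, cscPend, ih, Option.some_inj]
          split_ifs <;> try ring
          all_goals (rename_i hc; exact absurd hc.1.symm hd)

lemma cscCnt_cons2_eq (t : List Int) : ∀ (a b : Int), cscCnt (a :: b :: t) = cscG (some (b - a)) b t := by
  induction t with
  | nil => intro a b; simp [cscCnt, cscG]
  | cons c t ih =>
      intro a b
      simp only [cscCnt, cscG, ih]
      congr 1
      have : ((a + 1 = b ∧ b + 1 = c) ∨ (a - 1 = b ∧ b - 1 = c))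
          ↔ (some (b - a) = some (c - b) ∧ (c - b = 1 ∨ c - b = -1)) := by
        simp only [Option.some_inj]
        omega
      rw [if_congr this rfl rfl]

lemma cscCnt_cons_eq (a : Int) (t : List Int) : cscCnt (a :: t) = cscG none a t := by
  cases t with
  | nil => simp [cscCnt, cscG]
  | cons b t =>
      rw [cscCnt_cons2_eq]
      simp [cscG]

-- B in terms of cscCnt
lemma alt_eq_cnt (password : String) :
    count_sequential_chars_alt password = cscCnt (((PySem.Str.lower password).toList).map cscOrd) := by
  unfold count_sequential_chars_alt
  cases h : (PySem.Str.lower password).toList with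
  | nil => simp [cscCnt]
  | cons c t =>
      show csc_go c none 0 0 t = cscCnt (List.map cscOrd (c :: t))
      rw [csc_go_eq]
      simp [cscPend, cscCnt_cons_eq]

-- foldl over range of (acc + f k) is the sum
lemma foldl_range_add (f : Nat → Int) : ∀ (n : Nat) (init : Int),
    (List.range n).foldl (fun acc k => acc + f k) init = init + ∑ k ∈ Finset.range n, f k := by
  intro n
  induction n with
  | zero => simp
  | succ n ih =>
      intro init
      rw [List.range_succ, List.foldl_append, ih, Finset.sum_range_succ]
      simp [add_assoc]

def cscInd (p : List Char) (k : Nat) : Int :=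
  if ((cscOrd (p.getD k ' ')) + 1 = cscOrd (p.getD (k + 1) ' ') ∧
      cscOrd (p.getD (k + 1) ' ') + 1 = cscOrd (p.getD (k + 2) ' ')) ∨
     (cscOrd (p.getD k ' ') - 1 = cscOrd (p.getD (k + 1) ' ') ∧
      cscOrd (p.getD (k + 1) ' ') - 1 = cscOrd (p.getD (k + 2) ' ')) then 1 else 0

lemma sum_ind_eq_cnt : ∀ (p : List Char),
    (∑ k ∈ Finset.range (((p.length : Int) - 2).toNat), cscInd p k) = cscCnt (p.map cscOrd) := by
  intro p
  induction p with
  | nil => simp [cscCnt]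
  | cons a p ih =>
      by_cases hlen : 2 ≤ p.length
      · have hn : (((a :: p).length : Int) - 2).toNat = ((p.length : Int) - 2).toNat + 1 := by
          simp only [List.length_cons]; omega
        rw [hn, Finset.sum_range_succ']
        have hshift : ∀ k, cscInd (a :: p) (k + 1) = cscInd p k := by
          intro k; simp [cscInd]
        simp only [hshift, ih]
        obtain ⟨b, p', rfl⟩ : ∃ b p', p = b :: p' := by
          cases p with | nil => simp at hlen | cons b p' => exact ⟨b, p', rfl⟩
        obtain ⟨c, p'', rfl⟩ : ∃ c p'', p' = c :: p'' := by
          cases p' with | nil => simp at hlen | cons c p'' => exact ⟨c, p'', rfl⟩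
        simp only [List.map_cons, cscCnt, cscInd, List.getD, List.getElem?_cons_zero,
          List.getElem?_cons_succ, Option.getD_some]
        ring
      · have hn : (((a :: p).length : Int) - 2).toNat = 0 := by
          simp only [List.length_cons]; omega
        rw [hn]
        match p, hlen with
        | [], _ => simp [cscCnt]
        | [b], _ => simp [cscCnt]
        | b :: c :: p', hlen => exact absurd (by simp) hlen

-- A in terms of cscCnt
lemma a_eq_cnt (password : String) :
    count_sequential_chars password = cscCnt (((PySem.Str.lower password).toList).map cscOrd) := by
  unfold count_sequential_chars
  dsimp only
  rw [PySem.List.pyRange_one, List.foldl_map]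
  refine Eq.trans (PySem.List.foldl_congr_mem
      (g := fun acc k => acc + cscInd (PySem.Str.lower password).toList k) _ _ _ ?_) ?_
  · intro acc k hk
    have hk' : k + 2 < (PySem.Str.lower password).toList.length := by
      simp only [List.mem_range] at hk; omega
    simp only []
    have e0 : PySem.List.pyGetD (PySem.Str.lower password).toList ((0 : Int) + (k : Int)) ' '
        = (PySem.Str.lower password).toList.getD k ' ' := by
      rw [show ((0 : Int) + (k : Int)) = ((k : Nat) : Int) by ring]
      exact PySem.List.pyGetD_natCast ..
    have e1 : PySem.List.pyGetD (PySem.Str.lower password).toList ((0 : Int) + (k : Int) + 1) ' '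
        = (PySem.Str.lower password).toList.getD (k + 1) ' ' := by
      rw [show ((0 : Int) + (k : Int) + 1) = ((k + 1 : Nat) : Int) by push_cast; ring]
      exact PySem.List.pyGetD_natCast ..
    have e2 : PySem.List.pyGetD (PySem.Str.lower password).toList ((0 : Int) + (k : Int) + 2) ' '
        = (PySem.Str.lower password).toList.getD (k + 2) ' ' := by
      rw [show ((0 : Int) + (k : Int) + 2) = ((k + 2 : Nat) : Int) by push_cast; ring]
      exact PySem.List.pyGetD_natCast ..
    rw [e0, e1, e2]
    simp only [cscInd, cscOrd]
    split_ifs <;> try ring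
    all_goals omega
  · rw [foldl_range_add, sub_zero, sum_ind_eq_cnt]
    simp

-- ===== VERDICT (by name: the statement is the Claim_ definition above) =====
theorem count_sequential_chars_spec : Claim_equal_count_sequential_chars := by
  intro password _
  unfold Spec_count_sequential_chars
  rw [a_eq_cnt, alt_eq_cnt]
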